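-- pv_equiv track=rewrite | github.com/ngraczykowski/iris-root | etl-pipeline/etl_pipeline/custom/ms/transformations.py | create_agent_input_agg_col_config
-- ===== SOURCE A (Python) =====
-- def create_agent_input_agg_col_config(agent_input_prepended_agent_name_config):
--     """Create the source and target columns based on the standardized agent input config.
--
--     Input:
--     { 'name_agent': {'name_agent_ap': ['record_name', 'whatever_other_name'],
--                      'name_agent_ap_aliases': [],
--                      'name_agent_wl': ['name_hit'],
--                      'name_agent_wl_aliases': []
--                     }
--     }
--
--     Output:
--     {'name_agent': {'ap_all_names_aggregated': ['name_agent_ap', 'name_agent_ap_aliases'],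
--                     'wl_all_names_aggregated': ['name_agent_wl', 'name_agent_wl_aliases']
--                    }
--     }
--     """
--
--     def _generate_simple_plural(word):
--         if word.lower().endswith("s"):
--             return word.lower() + "es"
--         elif word.lower().endswith("y") and word.lower()[-2:] not in [
--             "ay",
--             "ey",
--             "iy",
--             "oy",
--             "uy",
--         ]:
--             return word.lower()[:-1] + "ies"
--         else:
--             return word.lower() + "s"
--
--     def _get_ap_or_wl_agg_source_cols(level_1_value, party):
--         source_cols = []
--         for col in level_1_value.keys():
--             if col.endswith(f"_{party}") or col.endswith(f"_{party}_aliases"):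
--                 source_cols.append(col)
--
--         return source_cols
--
--     agent_input_agg_col_config = {}
--
--     for agent_name, config in agent_input_prepended_agent_name_config.items():
--         agent_type = agent_name.split("_agent", 1)[0]
--         agent_ap_agg_col = f"""ap_all_{_generate_simple_plural(agent_type)}_aggregated"""
--         agent_wl_agg_col = f"""wl_all_{_generate_simple_plural(agent_type)}_aggregated"""
--
--         agent_ap_agg_source_cols = _get_ap_or_wl_agg_source_cols(config, "ap")
--         agent_wl_agg_source_cols = _get_ap_or_wl_agg_source_cols(config, "wl")
--
--         agent_input_agg_col_config[agent_name] = {}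
--         agent_input_agg_col_config[agent_name][agent_ap_agg_col] = agent_ap_agg_source_cols
--         agent_input_agg_col_config[agent_name][agent_wl_agg_col] = agent_wl_agg_source_cols
--
--     return agent_input_agg_col_config
-- ===== SOURCE B (Python) =====
-- def create_agent_input_agg_col_config(agent_input_prepended_agent_name_config):
--     def _generate_simple_plural(word):
--         if word.lower().endswith("s"):
--             return word.lower() + "es"
--         elif word.lower().endswith("y") and word.lower()[-2:] not in [
--             "ay",
--             "ey",
--             "iy",
--             "oy",
--             "uy",
--         ]:
--             return word.lower()[:-1] + "ies"
--         else:
--             return word.lower() + "s"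
--
--     result = {}
--     for agent_name, config in agent_input_prepended_agent_name_config.items():
--         # Classify columns by their trailing underscore-token (after stripping an
--         # optional "_aliases" suffix) into party buckets, instead of suffix tests.
--         buckets = {"ap": [], "wl": []}
--         for col in config:
--             base = col.removesuffix("_aliases")
--             _, sep, tok = base.rpartition("_")
--             if sep and tok in buckets:
--                 buckets[tok].append(col)
--         plural = _generate_simple_plural(agent_name.split("_agent", 1)[0])
--         result[agent_name] = {
--             f"ap_all_{plural}_aggregated": buckets["ap"],
--             f"wl_all_{plural}_aggregated": buckets["wl"],
--         }
--     return result
-- ===== Notes on version B (the rewrite author's own statement) =====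
-- stated objective: alternative
-- what changed: B abandons A's per-party suffix-scan helper entirely: instead of testing each column against four suffix strings in two scans, B extracts each column's trailing underscore-token (after stripping an optional '_aliases' suffix via removesuffix/rpartition) and routes the column through a bucket dictionary keyed by party token.
import Mathlib
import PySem

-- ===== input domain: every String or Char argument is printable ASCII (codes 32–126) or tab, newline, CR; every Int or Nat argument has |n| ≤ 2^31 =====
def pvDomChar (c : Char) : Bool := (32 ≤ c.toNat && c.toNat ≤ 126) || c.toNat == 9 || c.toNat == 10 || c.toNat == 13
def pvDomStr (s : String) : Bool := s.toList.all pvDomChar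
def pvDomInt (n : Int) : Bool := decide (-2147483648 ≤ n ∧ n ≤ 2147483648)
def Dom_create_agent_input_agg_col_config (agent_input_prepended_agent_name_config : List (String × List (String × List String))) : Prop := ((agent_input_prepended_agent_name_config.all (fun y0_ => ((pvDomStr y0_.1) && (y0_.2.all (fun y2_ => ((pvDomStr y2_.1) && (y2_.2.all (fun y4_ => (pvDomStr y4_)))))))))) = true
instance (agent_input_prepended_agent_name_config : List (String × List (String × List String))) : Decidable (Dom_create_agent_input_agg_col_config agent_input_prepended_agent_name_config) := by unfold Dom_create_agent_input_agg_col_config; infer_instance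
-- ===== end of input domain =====

-- B replaces A's two per-party suffix-test scans by one token-extraction pass: each
-- column's trailing underscore-token (after stripping an optional "_aliases" suffix)
-- selects a bucket in a party-keyed dictionary ('alternative'); identical output.

-- ===== PORT A =====

-- shared helper: both Pythons contain the literal same `_generate_simple_plural`
def pvGenerateSimplePlural (word : String) : String :=
  let l := PySem.Chars.lower word.toList
  if PySem.Chars.endswith l ['s'] then String.ofList (l ++ ['e', 's'])
  else if PySem.Chars.endswith l ['y'] &&
      !(["ay", "ey", "iy", "oy", "uy"].map String.toList).contains
          (PySem.List.slice l (some (-2)) none) then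
    String.ofList (PySem.List.slice l none (some (-1)) ++ ['i', 'e', 's'])
  else String.ofList (l ++ ['s'])

-- A's `_get_ap_or_wl_agg_source_cols`
def pvGetApOrWlAggSourceCols (level_1_value : List (String × List String)) (party : String) :
    List String :=
  level_1_value.foldl
    (fun source_cols kv =>
      if PySem.Str.endswith kv.1 (String.ofList ('_' :: party.toList)) ||
          PySem.Str.endswith kv.1 (String.ofList ('_' :: party.toList ++ "_aliases".toList)) then
        source_cols ++ [kv.1]
      else source_cols)
    []

def create_agent_input_agg_col_config (agent_input_prepended_agent_name_config : List (String × List (String × List String))) : List (String × List (String × List String)) :=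
  (agent_input_prepended_agent_name_config.foldl
    (fun (acc : PySem.Dict String (List (String × List String))) item =>
      let agent_name := item.1
      let config := item.2
      let agent_type := ((PySem.Str.splitMax? agent_name "_agent" 1).getD []).getD 0 ""
      let agent_ap_agg_col :=
        String.ofList ("ap_all_".toList ++ (pvGenerateSimplePlural agent_type).toList ++ "_aggregated".toList)
      let agent_wl_agg_col :=
        String.ofList ("wl_all_".toList ++ (pvGenerateSimplePlural agent_type).toList ++ "_aggregated".toList)
      let agent_ap_agg_source_cols := pvGetApOrWlAggSourceCols config "ap"
      let agent_wl_agg_source_cols := pvGetApOrWlAggSourceCols config "wl"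
      acc.insert agent_name
        (((PySem.Dict.empty.insert agent_ap_agg_col agent_ap_agg_source_cols).insert
            agent_wl_agg_col agent_wl_agg_source_cols).items))
    PySem.Dict.empty).items

-- ===== PORT B =====

-- hand port of str.removesuffix (exact: strip the suffix iff it is one)
def pvRemoveSuffix (l suf : List Char) : List Char :=
  if PySem.Chars.endswith l suf then l.take (l.length - suf.length) else l

-- hand port of str.rpartition with a single-char separator (exact: split at the LAST
-- occurrence of sep; (head, found?, tail); if absent Python returns ('', '', s))
def pvRPartition (l : List Char) (sep : Char) : List Char × Bool × List Char :=
  if sep ∈ l then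
    (((l.reverse.dropWhile (· != sep)).tail).reverse, true,
      (l.reverse.takeWhile (· != sep)).reverse)
  else ([], false, l)

def create_agent_input_agg_col_config_alt (agent_input_prepended_agent_name_config : List (String × List (String × List String))) : List (String × List (String × List String)) :=
  (agent_input_prepended_agent_name_config.foldl
    (fun (acc : PySem.Dict String (List (String × List String))) item =>
      let agent_name := item.1
      let config := item.2
      -- bucket dict keyed by party token
      let buckets := config.foldl
        (fun (bk : PySem.Dict String (List String)) kv =>
          let base := pvRemoveSuffix kv.1.toList "_aliases".toList
          let r := pvRPartition base '_'
          if r.2.1 && bk.contains (String.ofList r.2.2) then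
            bk.modify (String.ofList r.2.2) [] (· ++ [kv.1])
          else bk)
        (PySem.Dict.ofList [("ap", []), ("wl", [])])
      let plural := pvGenerateSimplePlural (((PySem.Str.splitMax? agent_name "_agent" 1).getD []).getD 0 "")
      acc.insert agent_name
        ((PySem.Dict.ofList
          [(String.ofList ("ap_all_".toList ++ plural.toList ++ "_aggregated".toList), buckets.getD "ap" []),
           (String.ofList ("wl_all_".toList ++ plural.toList ++ "_aggregated".toList), buckets.getD "wl" [])]).items))
    PySem.Dict.empty).items

-- ===== PRECONDITION & SPEC =====
def Spec_create_agent_input_agg_col_config (agent_input_prepended_agent_name_config : List (String × List (String × List String))) (out : List (String × List (String × List String))) : Prop := out = create_agent_input_agg_col_config_alt agent_input_prepended_agent_name_config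
instance (agent_input_prepended_agent_name_config : List (String × List (String × List String))) (out : List (String × List (String × List String))) : Decidable (Spec_create_agent_input_agg_col_config agent_input_prepended_agent_name_config out) := by unfold Spec_create_agent_input_agg_col_config; infer_instance

-- ===== CLAIM (what is proved, stated in full; the proofs are below) =====
def Claim_equal_create_agent_input_agg_col_config : Prop := ∀ (agent_input_prepended_agent_name_config : List (String × List (String × List String))), Dom_create_agent_input_agg_col_config agent_input_prepended_agent_name_config → Spec_create_agent_input_agg_col_config agent_input_prepended_agent_name_config (create_agent_input_agg_col_config agent_input_prepended_agent_name_config)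

-- ===== LEMMAS AND PROOFS =====

-- rpartition finds token [c1,c2] (c1,c2 ≠ '_') iff the word ends with ['_',c1,c2]
theorem pv_rpart_iff (b : List Char) (c1 c2 : Char)
    (h1 : (c1 != '_') = true) (h2 : (c2 != '_') = true) :
    ((pvRPartition b '_').2.1 = true ∧ (pvRPartition b '_').2.2 = [c1, c2]) ↔
      ['_', c1, c2] <:+ b := by
  unfold pvRPartition
  by_cases hm : '_' ∈ b
  · simp only [hm, if_true, true_and]
    rw [List.reverse_eq_iff]
    rw [← List.reverse_prefix]
    show b.reverse.takeWhile (· != '_') = [c2, c1] ↔ [c2, c1, '_'] <+: b.reverse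
    have hmr : '_' ∈ b.reverse := by simpa using hm
    generalize b.reverse = r at hmr ⊢
    constructor
    · intro ht
      have hsplit := List.takeWhile_append_dropWhile (p := (· != '_')) (l := r)
      have hne : r.dropWhile (· != '_') ≠ [] := by
        intro h0
        rw [← hsplit, h0, List.append_nil, ht] at hmr
        simp at hmr
        rcases hmr with h | h <;> simp [h.symm] at h1 h2
      have hhd := List.head_dropWhile_not (· != '_') hne
      have hhd' : (r.dropWhile (· != '_')).head hne = '_' := by
        simpa using hhd
      have hr : r = [c2, c1] ++ ('_' :: (r.dropWhile (· != '_')).tail) := by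
        conv_lhs => rw [← hsplit]
        rw [ht]
        congr 1
        have hct := List.cons_head_tail hne
        rw [hhd'] at hct
        exact hct.symm
      exact ⟨(r.dropWhile (· != '_')).tail, hr.symm⟩
    · rintro ⟨t, ht⟩
      have : r = [c2, c1, '_'] ++ t := ht.symm ▸ rfl
      subst this
      simp [h1, h2]
  · simp only [hm, if_false]
    constructor
    · rintro ⟨h, -⟩; exact absurd h (by simp)
    · intro h; exact absurd (h.mem (by simp)) hm

-- token classification iff A's two suffix tests (at the char-list level)
theorem pv_classify_iff (l : List Char) (c1 c2 : Char)
    (h1 : (c1 != '_') = true) (h2 : (c2 != '_') = true) :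
    ((pvRPartition (pvRemoveSuffix l "_aliases".toList) '_').2.1 = true ∧
      (pvRPartition (pvRemoveSuffix l "_aliases".toList) '_').2.2 = [c1, c2]) ↔
    (PySem.Chars.endswith l ['_', c1, c2] ||
      PySem.Chars.endswith l ('_' :: c1 :: c2 :: "_aliases".toList)) = true := by
  unfold pvRemoveSuffix
  by_cases hA : PySem.Chars.endswith l "_aliases".toList = true
  · -- l ends with "_aliases": strip it; the short suffix test is impossible
    obtain ⟨m, hm⟩ := (PySem.Chars.endswith_iff _ _).mp hA
    simp only [hA, if_true]
    obtain rfl : l = m ++ "_aliases".toList := hm.symm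
    have hbase : (m ++ "_aliases".toList).take ((m ++ "_aliases".toList).length - ("_aliases".toList).length) = m := by
      simp [List.length_append]
    rw [hbase]
    have hshort : PySem.Chars.endswith (m ++ "_aliases".toList) ['_', c1, c2] = false := by
      rw [Bool.eq_false_iff]
      intro hs
      have hs' := (PySem.Chars.endswith_iff _ _).mp hs
      rcases List.suffix_or_suffix_of_suffix hs' (List.suffix_append m "_aliases".toList) with h | h
      · -- ['_',c1,c2] suffix of "_aliases" ⇒ equals its last three chars "ses" ⇒ '_' = 's'
        obtain ⟨t, ht⟩ := h
        have hlen : t.length + 3 = 8 := by simpa using congrArg List.length ht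
        have ht5 : t.length = 5 := by omega
        match t, ht5 with
        | [a,b,c,d,e], _ =>
          have := ht
          simp at this
      · have := h.length_le
        simp at this
    have hlong : PySem.Chars.endswith (m ++ "_aliases".toList) ('_' :: c1 :: c2 :: "_aliases".toList) =
        PySem.Chars.endswith m ['_', c1, c2] := by
      have hsplit : ('_' :: c1 :: c2 :: "_aliases".toList) = ['_', c1, c2] ++ "_aliases".toList := rfl
      rw [hsplit, Bool.eq_iff_iff, PySem.Chars.endswith_iff, PySem.Chars.endswith_iff]
      constructor
      · intro hs
        rw [← List.reverse_prefix] at hs ⊢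
        simp only [List.reverse_append] at hs
        exact (List.prefix_append_right_inj _).mp hs
      · intro hs
        rw [← List.reverse_prefix] at hs ⊢
        simp only [List.reverse_append]
        exact (List.prefix_append_right_inj _).mpr hs
    rw [hshort, hlong, Bool.false_or, PySem.Chars.endswith_iff]
    exact pv_rpart_iff m c1 c2 h1 h2
  · -- l does not end with "_aliases": no stripping; the long suffix test is impossible
    simp only [Bool.not_eq_true] at hA
    simp only [hA, Bool.false_eq_true, if_false]
    have hlong : PySem.Chars.endswith l ('_' :: c1 :: c2 :: "_aliases".toList) = false := by
      rw [Bool.eq_false_iff]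
      intro hs
      apply Bool.eq_false_iff.mp hA
      apply (PySem.Chars.endswith_iff _ _).mpr
      exact (List.suffix_append ['_', c1, c2] "_aliases".toList).trans
        ((PySem.Chars.endswith_iff _ _).mp hs)
    rw [hlong, Bool.or_false, PySem.Chars.endswith_iff]
    exact pv_rpart_iff l c1 c2 h1 h2

-- one bucket-fold step evaluated against A's two suffix tests
theorem pv_step_eval (a w : List String) (kv : String × List String) :
    (if (pvRPartition (pvRemoveSuffix kv.1.toList "_aliases".toList) '_').2.1 &&
        (PySem.Dict.ofList [("ap", a), ("wl", w)]).contains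
          (String.ofList (pvRPartition (pvRemoveSuffix kv.1.toList "_aliases".toList) '_').2.2) then
      (PySem.Dict.ofList [("ap", a), ("wl", w)]).modify
        (String.ofList (pvRPartition (pvRemoveSuffix kv.1.toList "_aliases".toList) '_').2.2) []
        (· ++ [kv.1])
    else PySem.Dict.ofList [("ap", a), ("wl", w)])
    = PySem.Dict.ofList
        [("ap", if PySem.Str.endswith kv.1 "_ap" || PySem.Str.endswith kv.1 "_ap_aliases" then a ++ [kv.1] else a),
         ("wl", if PySem.Str.endswith kv.1 "_wl" || PySem.Str.endswith kv.1 "_wl_aliases" then w ++ [kv.1] else w)] := by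
  have hap := pv_classify_iff kv.1.toList 'a' 'p' (by decide) (by decide)
  have hwl := pv_classify_iff kv.1.toList 'w' 'l' (by decide) (by decide)
  have eap : (PySem.Str.endswith kv.1 "_ap" || PySem.Str.endswith kv.1 "_ap_aliases")
      = (PySem.Chars.endswith kv.1.toList ['_', 'a', 'p'] ||
         PySem.Chars.endswith kv.1.toList ('_' :: 'a' :: 'p' :: "_aliases".toList)) := by
    simp [PySem.Str.endswith_eq]
  have ewl : (PySem.Str.endswith kv.1 "_wl" || PySem.Str.endswith kv.1 "_wl_aliases")
      = (PySem.Chars.endswith kv.1.toList ['_', 'w', 'l'] ||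
         PySem.Chars.endswith kv.1.toList ('_' :: 'w' :: 'l' :: "_aliases".toList)) := by
    simp [PySem.Str.endswith_eq]
  set r := pvRPartition (pvRemoveSuffix kv.1.toList "_aliases".toList) '_' with hr
  by_cases h1 : r.2.1 = true ∧ r.2.2 = ['a', 'p']
  · obtain ⟨hb, ht⟩ := h1
    have htest := hap.mp ⟨hb, ht⟩
    have hwlf : ¬ (PySem.Chars.endswith kv.1.toList ['_', 'w', 'l'] ||
        PySem.Chars.endswith kv.1.toList ('_' :: 'w' :: 'l' :: "_aliases".toList)) = true := by
      intro hc
      have := (hwl.mpr hc).2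
      rw [ht] at this; simp at this
    rw [hb, ht]
    rw [eap, ewl, htest, if_pos rfl, if_neg hwlf]
    rfl
  · by_cases h2 : r.2.1 = true ∧ r.2.2 = ['w', 'l']
    · obtain ⟨hb, ht⟩ := h2
      have htest := hwl.mp ⟨hb, ht⟩
      have hapf : ¬ (PySem.Chars.endswith kv.1.toList ['_', 'a', 'p'] ||
          PySem.Chars.endswith kv.1.toList ('_' :: 'a' :: 'p' :: "_aliases".toList)) = true := by
        intro hc
        have := (hap.mpr hc).2
        rw [ht] at this; simp at this
      rw [hb, ht]
      rw [eap, ewl, htest, if_pos rfl, if_neg hapf]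
      rfl
    · have hapf : ¬ (PySem.Chars.endswith kv.1.toList ['_', 'a', 'p'] ||
          PySem.Chars.endswith kv.1.toList ('_' :: 'a' :: 'p' :: "_aliases".toList)) = true :=
        fun hc => h1 (hap.mpr hc)
      have hwlf : ¬ (PySem.Chars.endswith kv.1.toList ['_', 'w', 'l'] ||
          PySem.Chars.endswith kv.1.toList ('_' :: 'w' :: 'l' :: "_aliases".toList)) = true :=
        fun hc => h2 (hwl.mpr hc)
      rw [eap, ewl, if_neg hapf, if_neg hwlf]
      by_cases hb : r.2.1 = true
      · have hcont : (PySem.Dict.ofList [("ap", a), ("wl", w)]).contains (String.ofList r.2.2) = false := by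
          have hne1 : r.2.2 ≠ ['a', 'p'] := fun h => h1 ⟨hb, h⟩
          have hne2 : r.2.2 ≠ ['w', 'l'] := fun h => h2 ⟨hb, h⟩
          have : ∀ k : String, (PySem.Dict.ofList [("ap", a), ("wl", w)]).contains k = ("ap" == k || "wl" == k) := by
            intro k
            simp [PySem.Dict.ofList, PySem.Dict.update, PySem.Dict.contains, PySem.Dict.empty,
              PySem.Dict.insert, List.any]
          rw [this]
          have e1 : ("ap" == String.ofList r.2.2) = false := by
            rw [beq_eq_false_iff_ne]
            intro h
            apply hne1
            have := congrArg String.toList h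
            simpa using this.symm
          have e2 : ("wl" == String.ofList r.2.2) = false := by
            rw [beq_eq_false_iff_ne]
            intro h
            apply hne2
            have := congrArg String.toList h
            simpa using this.symm
          rw [e1, e2]
          rfl
        rw [hcont]
        simp
      · simp only [Bool.not_eq_true] at hb
        rw [hb]
        simp

-- B's bucket fold over the columns equals A's two append-if scans
theorem pv_bucket_fold (cols : List (String × List String)) (a w : List String) :
    cols.foldl
      (fun (bk : PySem.Dict String (List String)) kv =>
        let base := pvRemoveSuffix kv.1.toList "_aliases".toList
        let r := pvRPartition base '_'
        if r.2.1 && bk.contains (String.ofList r.2.2) then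
          bk.modify (String.ofList r.2.2) [] (· ++ [kv.1])
        else bk)
      (PySem.Dict.ofList [("ap", a), ("wl", w)])
    = PySem.Dict.ofList
        [("ap", cols.foldl (fun s kv =>
            if PySem.Str.endswith kv.1 "_ap" || PySem.Str.endswith kv.1 "_ap_aliases" then
              s ++ [kv.1] else s) a),
         ("wl", cols.foldl (fun s kv =>
            if PySem.Str.endswith kv.1 "_wl" || PySem.Str.endswith kv.1 "_wl_aliases" then
              s ++ [kv.1] else s) w)] := by
  induction cols generalizing a w with
  | nil => rfl
  | cons hd tl ih =>
    simp only [List.foldl_cons]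
    rw [pv_step_eval]
    exact ih _ _

-- ===== VERDICT (by name: the statement is the Claim_ definition above) =====
theorem create_agent_input_agg_col_config_spec : Claim_equal_create_agent_input_agg_col_config := by
  intro cfg _
  unfold Spec_create_agent_input_agg_col_config
  unfold create_agent_input_agg_col_config create_agent_input_agg_col_config_alt
  refine congrArg PySem.Dict.items ?_
  refine PySem.List.foldl_congr_mem _ _ _ _ ?_
  intro acc item _
  simp only [pvGetApOrWlAggSourceCols, pv_bucket_fold]
  have h1 : String.ofList ('_' :: "ap".toList) = "_ap" := rfl
  have h2 : String.ofList ('_' :: "ap".toList ++ "_aliases".toList) = "_ap_aliases" := rfl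
  have h3 : String.ofList ('_' :: "wl".toList) = "_wl" := rfl
  have h4 : String.ofList ('_' :: "wl".toList ++ "_aliases".toList) = "_wl_aliases" := rfl
  simp only [h1, h2, h3, h4]
  simp only [PySem.Dict.ofList, PySem.Dict.update, PySem.Dict.getD, PySem.Dict.get?,
    List.foldl_cons, List.foldl_nil]
  rfl
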